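-- pv_equiv track=rewrite | github.com/bralexx/ad_parsing | data/filtering_functions.py | count_unique_symbols
-- ===== SOURCE A (Python) =====
-- import string
--
-- def count_unique_symbols(input_string):
--     valid_chars = set(string.ascii_letters + string.digits + string.punctuation + ' ' +
--                       'абвгдежзийклмнопрстуфхцчшщъыьэюя' + 'АБВГДЕЖЗИЙКЛМНОПРСТУФХЦЧШЩЪЫЬЭЮЯ')
--
--     count = 0
--     for char in input_string:
--         if char not in valid_chars:
--             count += 1
--
--     return count
-- ===== SOURCE B (Python) =====
-- import string
--
-- def count_unique_symbols(input_string):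
--     valid_chars = set(string.ascii_letters + string.digits + string.punctuation + ' ' +
--                       'абвгдежзийклмнопрстуфхцчшщъыьэюя' + 'АБВГДЕЖЗИЙКЛМНОПРСТУФХЦЧШЩЪЫЬЭЮЯ')
--
--     freq = {}
--     for ch in input_string:
--         freq[ch] = freq.get(ch, 0) + 1
--
--     return sum(cnt for ch, cnt in freq.items() if ch not in valid_chars)
-- ===== Notes on version B (the rewrite author's own statement) =====
-- stated objective: alternative
-- what changed: B builds a character-frequency table in one pass and then sums the counts of the distinct symbols that are outside the valid alphabet, instead of testing membership once per character of the input.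
import Mathlib
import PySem

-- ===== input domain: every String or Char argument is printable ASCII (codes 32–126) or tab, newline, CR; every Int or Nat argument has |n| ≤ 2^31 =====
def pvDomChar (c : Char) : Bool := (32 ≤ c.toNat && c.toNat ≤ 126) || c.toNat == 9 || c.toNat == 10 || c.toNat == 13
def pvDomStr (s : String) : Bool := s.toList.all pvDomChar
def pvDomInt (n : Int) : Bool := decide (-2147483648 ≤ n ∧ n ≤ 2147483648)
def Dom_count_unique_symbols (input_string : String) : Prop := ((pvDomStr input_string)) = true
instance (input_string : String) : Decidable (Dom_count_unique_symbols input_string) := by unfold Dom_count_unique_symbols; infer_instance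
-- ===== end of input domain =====

-- B counts invalid characters via a frequency table over distinct symbols (weighted by their counts)
-- instead of a per-character membership loop; same result, alternative algorithm.

-- the valid alphabet, byte for byte the Python constant:
-- ascii_letters + digits + punctuation + ' ' + Cyrillic lower + Cyrillic upper
def pvValidChars : String := "abcdefghijklmnopqrstuvwxyzABCDEFGHIJKLMNOPQRSTUVWXYZ0123456789!\"#$%&'()*+,-./:;<=>?@[\\]^_`{|}~ абвгдежзийклмнопрстуфхцчшщъыьэюяАБВГДЕЖЗИЙКЛМНОПРСТУФХЦЧШЩЪЫЬЭЮЯ"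

-- ===== PORT A =====
def count_unique_symbols (input_string : String) : Int :=
  let valid_chars : PySem.Set Char := PySem.Set.ofList pvValidChars.toList
  input_string.toList.foldl
    (fun count char => if !(PySem.Set.contains valid_chars char) then count + 1 else count) 0

-- ===== PORT B =====
def count_unique_symbols_alt (input_string : String) : Int :=
  let valid_chars : PySem.Set Char := PySem.Set.ofList pvValidChars.toList
  let freq : PySem.Dict Char Int :=
    input_string.toList.foldl (fun d ch => d.insert ch (d.getD ch 0 + 1)) PySem.Dict.empty
  ((freq.items.filter (fun kv => !(PySem.Set.contains valid_chars kv.1))).map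
    (fun kv => kv.2)).sum

-- ===== PRECONDITION & SPEC =====
def Spec_count_unique_symbols (input_string : String) (out : Int) : Prop := out = count_unique_symbols_alt input_string
instance (input_string : String) (out : Int) : Decidable (Spec_count_unique_symbols input_string out) := by unfold Spec_count_unique_symbols; infer_instance

-- ===== CLAIM (what is proved, stated in full; the proofs are below) =====
def Claim_equal_count_unique_symbols : Prop := ∀ (input_string : String), Dom_count_unique_symbols input_string → Spec_count_unique_symbols input_string (count_unique_symbols input_string)

-- ===== LEMMAS AND PROOFS =====

-- sum of the 0/1 indicator of x over a duplicate-free list is membership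
theorem pv_sum_indicator (x : Char) : ∀ (l : List Char), l.Nodup →
    (l.map (fun k => if x = k then (1 : Int) else 0)).sum = if x ∈ l then 1 else 0 := by
  intro l
  induction l with
  | nil => intro _; simp
  | cons a t ih =>
    intro h
    rcases List.nodup_cons.mp h with ⟨ha, ht⟩
    by_cases hx : x = a
    · subst hx
      have h0 : (t.map (fun k => if x = k then (1 : Int) else 0)) = t.map (fun _ => (0 : Int)) := by
        apply List.map_congr_left
        intro k hk
        have hne : x ≠ k := fun e => ha (e ▸ hk)
        simp [hne]
      simp [h0]
    · simp [hx, ih ht]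

-- summing per-symbol counts over the distinct invalid symbols equals counting invalid occurrences
theorem pv_sum_counts_eq_countP (p : Char → Bool) :
    ∀ (xs l : List Char), l.Nodup → (∀ c ∈ xs, c ∈ l) →
    ((l.filter (fun k => !(p k))).map (fun k => (List.count k xs : Int))).sum
      = (xs.countP (fun c => !(p c)) : Int) := by
  intro xs
  induction xs with
  | nil => intro l _ _; simp
  | cons x xs ih =>
    intro l hl hmem
    have hsub : ∀ c ∈ xs, c ∈ l := fun c hc => hmem c (List.mem_cons_of_mem _ hc)
    have hmap : (l.filter (fun k => !(p k))).map (fun k => (List.count k (x :: xs) : Int))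
        = (l.filter (fun k => !(p k))).map
            (fun k => (List.count k xs : Int) + (if x = k then (1 : Int) else 0)) := by
      apply List.map_congr_left
      intro k _
      rw [List.count_cons]
      by_cases h : x = k <;> simp [h]
    rw [hmap, PySem.List.sum_map_add_int]
    rw [ih l hl hsub]
    rw [pv_sum_indicator x _ (hl.filter _)]
    rw [List.countP_cons]
    have hx : x ∈ l := hmem x List.mem_cons_self
    by_cases hp : p x
    · simp [hp, hx]
    · have hpx : p x = false := by simpa using hp
      simp [hpx, hx, Int.add_comm]

-- ===== VERDICT (by name: the statement is the Claim_ definition above) =====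
theorem count_unique_symbols_spec : Claim_equal_count_unique_symbols := by
  intro s _
  unfold Spec_count_unique_symbols count_unique_symbols count_unique_symbols_alt
  simp only []
  set xs := s.toList with hxs
  set valid := PySem.Set.ofList pvValidChars.toList with hvalid
  -- A side: the fold is a countP
  rw [PySem.List.foldl_count_if (fun c => !(PySem.Set.contains valid c)) xs 0]
  -- B side: the frequency fold is Counter, whose items are (distinct symbol, count) pairs
  rw [PySem.Dict.foldl_insert_getD_add_one_eq_counter, PySem.Dict.items_counter]
  rw [List.filter_map, List.map_map]
  have hcomp :
      ((PySem.Set.ofList xs).filter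
          ((fun kv : Char × Int => !(PySem.Set.contains valid kv.1)) ∘
            (fun k => (k, (List.count k xs : Int))))).map
        ((fun kv : Char × Int => kv.2) ∘ (fun k => (k, (List.count k xs : Int))))
        = ((PySem.Set.ofList xs).filter (fun k => !(PySem.Set.contains valid k))).map
            (fun k => (List.count k xs : Int)) := by
      simp [Function.comp_def]
  rw [hcomp]
  rw [pv_sum_counts_eq_countP (fun c => PySem.Set.contains valid c) xs (PySem.Set.ofList xs)
        (PySem.Set.nodup_ofList xs) (fun c hc => (PySem.Set.mem_ofList xs c).mpr hc)]
  ring
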